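-- pv_equiv track=rewrite | github.com/anpoc/ScienceHack | src/main.py | chunk_starts
-- ===== SOURCE A (Python) =====
-- def chunk_starts(chunk_ids, split_pred):
--     """
--     Returns a list of (value, index) for each new chunk start,
--     triggered when the number changes (ignoring -1s).
--
--     Parameters:
--         chunk_ids (list of int): Input list.
--
--     Returns:
--         list of tuples: (value, index) for chunk starts.
--     """
--     if not chunk_ids:
--         return []
--
--     result = []
--     current_value = chunk_ids[0] if chunk_ids[0] != -1 else None
--     result.append((current_value, 0))
--     for idx in range(1, len(chunk_ids)):
--         val = chunk_ids[idx]
--         if split_pred[idx] == 0: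
--             continue
--         if val == -1:
--             continue
--         if val != current_value:
--             result.append((val, idx))
--             current_value = val
--     return result
-- ===== SOURCE B (Python) =====
-- def chunk_starts(chunk_ids, split_pred):
--     if not chunk_ids:
--         return []
--     head = (chunk_ids[0] if chunk_ids[0] != -1 else None, 0)
--     active = [head] + [(chunk_ids[i], i)
--                        for i in range(1, len(chunk_ids))
--                        if split_pred[i] != 0 and chunk_ids[i] != -1]
--     return [head] + [q for p, q in zip(active, active[1:]) if q[0] != p[0]]
-- ===== Notes on version B (the rewrite author's own statement) =====
-- stated objective: alternative
-- what changed: Replaces A's single fused stateful loop (carrying current_value and appending on change) by a filter comprehension that first builds the 'active' (value,index) pairs and a second zip-with-predecessor pass keeping each pair whose value differs from the previous active pair.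
import Mathlib
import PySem

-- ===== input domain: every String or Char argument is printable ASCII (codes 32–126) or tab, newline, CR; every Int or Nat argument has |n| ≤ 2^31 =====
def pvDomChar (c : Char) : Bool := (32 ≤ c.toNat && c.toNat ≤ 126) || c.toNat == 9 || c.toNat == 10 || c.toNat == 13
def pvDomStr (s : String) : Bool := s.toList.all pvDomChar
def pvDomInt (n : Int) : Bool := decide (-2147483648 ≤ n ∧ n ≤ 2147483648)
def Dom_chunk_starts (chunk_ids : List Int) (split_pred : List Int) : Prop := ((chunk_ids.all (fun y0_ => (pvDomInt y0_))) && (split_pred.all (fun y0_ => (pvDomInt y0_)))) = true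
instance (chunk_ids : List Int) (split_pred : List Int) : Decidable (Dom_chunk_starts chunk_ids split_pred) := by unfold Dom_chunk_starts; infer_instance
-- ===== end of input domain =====

-- B replaces A's single fused stateful loop by a filter-comprehension building the "active"
-- pairs followed by a pairwise (zip-with-predecessor) consecutive-dedup pass (objective: alternative).


-- ===== PORT A =====
-- loop body of A (helper; A folds it over idx = 1..len-1)
def stepA (chunk_ids : List Int) (split_pred : List Int)
    (st : List (Option Int × Int) × Option Int) (idx : Int) :
    List (Option Int × Int) × Option Int :=
  let val := PySem.List.pyGetD chunk_ids idx 0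
  if PySem.List.pyGetD split_pred idx 0 = 0 then st
  else if val = -1 then st
  else if some val ≠ st.2 then (st.1 ++ [(some val, idx)], some val)
  else st

-- A: one stateful loop carrying (result, current_value), appending on change.
def chunk_starts (chunk_ids : List Int) (split_pred : List Int) : List (Option Int × Int) :=
  match chunk_ids with
  | [] => []
  | c0 :: _ =>
    let current_value : Option Int := if c0 ≠ -1 then some c0 else none
    ((PySem.List.pyRange 1 chunk_ids.length 1).foldl (stepA chunk_ids split_pred)
      ([(current_value, (0 : Int))], current_value)).1

-- ===== PORT B =====
-- B's comprehension filter (helper)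
def keepB (chunk_ids : List Int) (split_pred : List Int) (i : Int) : Option (Option Int × Int) :=
  if PySem.List.pyGetD split_pred i 0 ≠ 0 ∧ PySem.List.pyGetD chunk_ids i 0 ≠ -1 then
    some (some (PySem.List.pyGetD chunk_ids i 0), i)
  else none

-- B: build the filtered "active" list, then keep each pair whose value differs from its predecessor.
def chunk_starts_alt (chunk_ids : List Int) (split_pred : List Int) : List (Option Int × Int) :=
  match chunk_ids with
  | [] => []
  | c0 :: _ =>
    let head : Option Int × Int := (if c0 ≠ -1 then some c0 else none, 0)
    let active : List (Option Int × Int) :=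
      head :: (PySem.List.pyRange 1 chunk_ids.length 1).filterMap (keepB chunk_ids split_pred)
    head :: (active.zip active.tail).filterMap
      (fun pq => if pq.2.1 ≠ pq.1.1 then some pq.2 else none)

-- ===== PRECONDITION & SPEC =====
-- Pre_ excludes exactly the inputs where Python A raises IndexError: split_pred shorter than
-- chunk_ids while the loop runs (len(chunk_ids) ≥ 2); B raises there too.
def Pre_chunk_starts (chunk_ids : List Int) (split_pred : List Int) : Prop :=
  chunk_ids.length ≤ 1 ∨ chunk_ids.length ≤ split_pred.length
instance (chunk_ids : List Int) (split_pred : List Int) : Decidable (Pre_chunk_starts chunk_ids split_pred) := by unfold Pre_chunk_starts; infer_instance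
def pvWitness_chunk_starts : List Int × List Int := ([1, 1, -1, 2], [1, 1, 1, 1])

def Spec_chunk_starts (chunk_ids : List Int) (split_pred : List Int) (out : List (Option Int × Int)) : Prop := out = chunk_starts_alt chunk_ids split_pred
instance (chunk_ids : List Int) (split_pred : List Int) (out : List (Option Int × Int)) : Decidable (Spec_chunk_starts chunk_ids split_pred out) := by unfold Spec_chunk_starts; infer_instance

-- ===== CLAIM (what is proved, stated in full; the proofs are below) =====
def Claim_equal_chunk_starts : Prop := ∀ (chunk_ids : List Int) (split_pred : List Int), Dom_chunk_starts chunk_ids split_pred → Pre_chunk_starts chunk_ids split_pred → Spec_chunk_starts chunk_ids split_pred (chunk_starts chunk_ids split_pred)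

-- ===== LEMMAS AND PROOFS =====

-- stateful consecutive-dedup (A's carry) on an arbitrary pair list
def sdedup (cur : Option Int) : List (Option Int × Int) → List (Option Int × Int)
  | [] => []
  | x :: xs => if x.1 ≠ cur then x :: sdedup x.1 xs else sdedup cur xs

-- pairwise consecutive-dedup (B's zip-with-predecessor)
def pdedup (prev : Option Int) : List (Option Int × Int) → List (Option Int × Int)
  | [] => []
  | x :: xs => (if x.1 ≠ prev then [x] else []) ++ pdedup x.1 xs

lemma sdedup_eq_pdedup (L : List (Option Int × Int)) : ∀ cur, sdedup cur L = pdedup cur L := by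
  induction L with
  | nil => intro cur; rfl
  | cons x xs ih =>
    intro cur
    by_cases h : x.1 = cur
    · simp [sdedup, pdedup, h, ih]
    · simp [sdedup, pdedup, h, ih]

lemma zip_filterMap_eq_pdedup (L : List (Option Int × Int)) : ∀ (h : Option Int × Int),
    (((h :: L).zip L).filterMap
      (fun pq => if pq.2.1 ≠ pq.1.1 then some pq.2 else none)) = pdedup h.1 L := by
  induction L with
  | nil => intro h; rfl
  | cons x xs ih =>
    intro h
    have hz : ((h :: x :: xs).zip (x :: xs)) = (h, x) :: ((x :: xs).zip xs) := rfl
    rw [hz, List.filterMap_cons, ih x]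
    by_cases hx : x.1 = h.1
    · simp [pdedup, hx]
    · simp [pdedup, hx]

-- A's fold unrolled: result = res ++ sdedup cur (B's filtered pairs of the remaining indices)
lemma foldA_eq (chunk_ids split_pred : List Int) (I : List Int) :
    ∀ (res : List (Option Int × Int)) (cur : Option Int),
    (I.foldl (stepA chunk_ids split_pred) (res, cur)).1 =
      res ++ sdedup cur (I.filterMap (keepB chunk_ids split_pred)) := by
  induction I with
  | nil => intro res cur; simp [sdedup]
  | cons i I ih =>
    intro res cur
    rw [List.foldl_cons, List.filterMap_cons]
    by_cases hs : PySem.List.pyGetD split_pred i 0 = 0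
    · rw [show stepA chunk_ids split_pred (res, cur) i = (res, cur) by simp [stepA, hs]]
      rw [show keepB chunk_ids split_pred i = none by simp [keepB, hs]]
      exact ih res cur
    · by_cases hv : PySem.List.pyGetD chunk_ids i 0 = -1
      · rw [show stepA chunk_ids split_pred (res, cur) i = (res, cur) by simp [stepA, hs, hv]]
        rw [show keepB chunk_ids split_pred i = none by simp [keepB, hv]]
        exact ih res cur
      · rw [show keepB chunk_ids split_pred i
            = some (some (PySem.List.pyGetD chunk_ids i 0), i) by simp [keepB, hs, hv]]
        by_cases hc : some (PySem.List.pyGetD chunk_ids i 0) = cur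
        · rw [show stepA chunk_ids split_pred (res, cur) i = (res, cur) by simp [stepA, hs, hv, hc]]
          rw [ih res cur]
          simp [sdedup, hc.symm]
        · rw [show stepA chunk_ids split_pred (res, cur) i
              = (res ++ [(some (PySem.List.pyGetD chunk_ids i 0), i)],
                 some (PySem.List.pyGetD chunk_ids i 0)) by simp [stepA, hs, hv, hc]]
          rw [ih]
          simp [sdedup, hc]

-- ===== VERDICT (by name: the statement is the Claim_ definition above) =====
theorem chunk_starts_spec : Claim_equal_chunk_starts := by
  intro chunk_ids split_pred _ _
  unfold Spec_chunk_starts chunk_starts chunk_starts_alt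
  cases chunk_ids with
  | nil => rfl
  | cons c0 cs =>
    simp only []
    rw [foldA_eq, List.tail_cons, zip_filterMap_eq_pdedup, sdedup_eq_pdedup]
    rfl
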